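/-
  THE REFINEMENT THEOREMS, CLOSED: the compiled jsmn_parse COMPUTES THE PURE MODEL, on the machine — for both binaries.

  `jsmn_parse_refines_D` / `_S`   On ANY machine state `m` in the model's user relation with a user state `v0` (`User.Abs n m v0`: 64-bit mode, `n.pages` × 2 MB
      identity-mapped, privilege level `n.cpl` = 0 or 3; `v0` = its registers, RIP, RFLAGS and flat memory) that satisfies the layout hypotheses of a call of jsmn_parse (`ScanPre`: RIP at jsmn_parse, the image at 100000H, the return address on the stack,
      rdi / rsi / rdx / rcx / r8d = parser, js, len, tokens, num_tokens; the text, the 12-byte parser struct and the token array mapped, pairwise disjoint, off the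
      image and off the function's stack window; tokens == NULL allowed: counting mode), with the model-side precondition `Inv` (Json/Jsmn/Inv.lean;
      Json/Jsmn/Terminates.lean says which C expression needs each conjunct), and for whatever fuel makes the model answer (for len < 2^32 it always does:
      `Jsmn.parse_total`): `X86.run` with the real decoder reaches, after finitely many steps (TERMINATION), a state `m'` in the relation with a user state `v'` with (`ScanPost`)
          eax = the model's result,  the parser struct = the model's parser state,  the token array = the model's tokens (byte for byte: `TokensAt`),
          RIP at the return address, rsp popped, the callee-saved registers restored, and
          NOTHING CHANGED IN MEMORY outside the function's stack window (88 / 96 bytes below the return address), the parser struct and the token array;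
          the system part of the machine (segments, descriptor tables, control registers …) is untouched.
  `jsmn_parse_reentrant_D` / `_S`  The same on the test harness's own start machine (`Interp.setup`, the stub _start_call6, a prepared parser state at 3FF000H,
      the tokens at 400000H or NULL) with any UNKNOWN stream `ub` (`Machine.withUnknownBits`: the processor's answers where a value is undefined): the run reaches the final HLT with the model's answer; and the state it leaves satisfies `Inv` again (`Jsmn.SafeFacts.parse`),
      so a second run from that state again computes the model (`X86.J6.Call6.parse_twice`).
  The contracts of the other functions, closed: Prog/Jsmn/D/Closed.lean, S/Closed.lean (`prim_closed`, `str_closed`, `run_closed`, `main_closed`).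
-/
import Prog.Jsmn.Theorem
import Prog.Jsmn.StartCall6Inst
import Prog.Jsmn.D.Closed
import Prog.Jsmn.S.Closed

namespace X86
namespace J6
open X86.User (CodeAt RegsKept Span FlagsOK Layout toNat_add_ofNat toNat_ofNat_lt' add_ofNat_add)
open Jsmn

/-- **jsmn_parse of jsmn_d.bin (default configuration) computes the model, on the machine.** -/
theorem jsmn_parse_refines_D {n : User.Layout} (μ : Microarch) (hμ : MicroOK μ) (m : Machine) (v0 : User.State) (ha : User.Abs n m v0)
    (ret pa jsA tb : Word) (js : List UInt8) (numTokens : Nat) (p : Parser) (toks : Option Tokens) (fuel : Nat) (r : Int) (p' : Parser)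
    (toks' : Option Tokens) (hp : ScanPre binD n binD.parse binD.useParse v0 ret pa jsA tb js numTokens p toks)
    (hr8 : Word.low .w32 (v0.reg .r8) = UInt64.ofNat numTokens) (hinv : Inv binD.cfg p toks numTokens)
    (hmodel : parseFuel binD.cfg fuel js p toks numTokens = some (r, p', toks')) :
    ∃ k m' v', _root_.X86.run (Dec.decoder μ (Dec.mkTable X86.allRows)) m k = .next m' ∧ User.Abs n m' v' ∧
      ScanPost binD binD.useParse v0 ret pa tb numTokens toks r p' toks' v' ∧ m'.sysPart = m.sysPart :=
  jsmn_parse_correct_v3_of (D.parse_closed n) μ hμ m v0 ha ret pa jsA tb js numTokens p toks fuel r p' toks' hp hr8 hinv hmodel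

/-- **jsmn_parse of jsmn_s.bin (-DJSMN_STRICT -DJSMN_PARENT_LINKS) computes the model, on the machine.** -/
theorem jsmn_parse_refines_S {n : User.Layout} (μ : Microarch) (hμ : MicroOK μ) (m : Machine) (v0 : User.State) (ha : User.Abs n m v0)
    (ret pa jsA tb : Word) (js : List UInt8) (numTokens : Nat) (p : Parser) (toks : Option Tokens) (fuel : Nat) (r : Int) (p' : Parser)
    (toks' : Option Tokens) (hp : ScanPre binS n binS.parse binS.useParse v0 ret pa jsA tb js numTokens p toks)
    (hr8 : Word.low .w32 (v0.reg .r8) = UInt64.ofNat numTokens) (hinv : Inv binS.cfg p toks numTokens)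
    (hmodel : parseFuel binS.cfg fuel js p toks numTokens = some (r, p', toks')) :
    ∃ k m' v', _root_.X86.run (Dec.decoder μ (Dec.mkTable X86.allRows)) m k = .next m' ∧ User.Abs n m' v' ∧
      ScanPost binS binS.useParse v0 ret pa tb numTokens toks r p' toks' v' ∧ m'.sysPart = m.sysPart :=
  jsmn_parse_correct_v3_of (S.parse_closed n) μ hμ m v0 ha ret pa jsA tb js numTokens p toks fuel r p' toks' hp hr8 hinv hmodel

open Call6 Start in
/-- **The re-entrant contract on the harness's start machine, default build**: from ANY prepared parser state and token array satisfying `Inv` (`hfit`: the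
prepared tokens' fields fit their 32-bit words — a fact about the file, true of every state a previous run left), for every text that fits, at ring 0 or
ring 3, the start machine carrying any UNKNOWN stream `ub`: the model answers, and the run through _start_call6 ends at the stub's HLT with that answer in rax, the model's parser state at 3FF000H, the model's
tokens at 400000H, and nothing else changed but the stack window and the two result slots (`AtEnd6`). -/
theorem jsmn_parse_reentrant_D (c : Nat) (hc : c = 0 ∨ c = 3) (μ : Microarch) (hμ : MicroOK μ) (ub : Nat → Bool) (js : List UInt8) (p : Parser)
    (toks : Option Tokens) (N : Nat) (hjs : js.length ≤ INMAX) (hN : binD.cfg.tokSize * N ≤ 0x3F8000) (hinv : Inv binD.cfg p toks N)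
    (hfit : ∀ ts, toks = some ts → ∀ t ∈ ts, Token.Fits binD.cfg t) :
    ∃ r p' toks', Jsmn.parse binD.cfg js p toks N = some (r, p', toks') ∧
      ∃ k m' v', _root_.X86.run (Dec.decoder μ (Dec.mkTable X86.allRows)) ((parseStart binD addrD c js p toks N).withUnknownBits ub) k = .next m' ∧
        User.Abs (User.startLayout c hc) m' v' ∧
        AtEnd6 binD addrD (parseState binD addrD c js p toks N) toks N r p' toks' v' ∧
        m'.sysPart = ((parseStart binD addrD c js p toks N).withUnknownBits ub).sysPart :=
  parse_from_start_total stub6D c hc (D.parse_closed _) μ hμ ub js p toks N hjs hN hinv hfit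

open Call6 Start in
/-- **The re-entrant contract on the harness's start machine (any UNKNOWN stream `ub`), strict build with parent links.** -/
theorem jsmn_parse_reentrant_S (c : Nat) (hc : c = 0 ∨ c = 3) (μ : Microarch) (hμ : MicroOK μ) (ub : Nat → Bool) (js : List UInt8) (p : Parser)
    (toks : Option Tokens) (N : Nat) (hjs : js.length ≤ INMAX) (hN : binS.cfg.tokSize * N ≤ 0x3F8000) (hinv : Inv binS.cfg p toks N)
    (hfit : ∀ ts, toks = some ts → ∀ t ∈ ts, Token.Fits binS.cfg t) :
    ∃ r p' toks', Jsmn.parse binS.cfg js p toks N = some (r, p', toks') ∧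
      ∃ k m' v', _root_.X86.run (Dec.decoder μ (Dec.mkTable X86.allRows)) ((parseStart binS addrS c js p toks N).withUnknownBits ub) k = .next m' ∧
        User.Abs (User.startLayout c hc) m' v' ∧
        AtEnd6 binS addrS (parseState binS addrS c js p toks N) toks N r p' toks' v' ∧
        m'.sysPart = ((parseStart binS addrS c js p toks N).withUnknownBits ub).sysPart :=
  parse_from_start_total stub6S c hc (S.parse_closed _) μ hμ ub js p toks N hjs hN hinv hfit

end J6
end X86

#print axioms X86.J6.jsmn_parse_refines_D
#print axioms X86.J6.jsmn_parse_refines_S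
#print axioms X86.J6.jsmn_parse_reentrant_D
#print axioms X86.J6.jsmn_parse_reentrant_S
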